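-- pv_equiv track=rewrite | github.com/ChildishClambino/Assignments-Python-Strings | part1.py | sentiment_tally
-- ===== SOURCE A (Python) =====
-- def sentiment_tally(review):
--     positive_words = ["good", "excellent", "great", "awesome", "fantastic", "superb", "amazing"]
--     negative_words = ["bad", "poor", "terrible", "horrible", "awful", "disappointing", "subpar"]
--
--     num_positive_words = 0
--     num_negative_words = 0
--
--     words = review.lower().split()
--
--     for word in words:
--         if word in positive_words:
--             num_positive_words += 1
--         elif word in negative_words:
--             num_negative_words += 1
--
--     return num_positive_words, num_negative_words
-- ===== SOURCE B (Python) =====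
-- def sentiment_tally(review):
--     positive_words = ["good", "excellent", "great", "awesome", "fantastic", "superb", "amazing"]
--     negative_words = ["bad", "poor", "terrible", "horrible", "awful", "disappointing", "subpar"]
--
--     counts = {}
--     for word in review.lower().split():
--         counts[word] = counts.get(word, 0) + 1
--
--     num_positive_words = sum(counts.get(w, 0) for w in positive_words)
--     num_negative_words = sum(counts.get(w, 0) for w in negative_words)
--     return num_positive_words, num_negative_words
-- ===== Notes on version B (the rewrite author's own statement) =====
-- stated objective: idiomatic
-- what changed: B builds a frequency table of the review's words in one pass and then sums the counts of the fixed positive/negative word lists, instead of scanning the review with an if/elif membership test per word.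
import Mathlib
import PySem

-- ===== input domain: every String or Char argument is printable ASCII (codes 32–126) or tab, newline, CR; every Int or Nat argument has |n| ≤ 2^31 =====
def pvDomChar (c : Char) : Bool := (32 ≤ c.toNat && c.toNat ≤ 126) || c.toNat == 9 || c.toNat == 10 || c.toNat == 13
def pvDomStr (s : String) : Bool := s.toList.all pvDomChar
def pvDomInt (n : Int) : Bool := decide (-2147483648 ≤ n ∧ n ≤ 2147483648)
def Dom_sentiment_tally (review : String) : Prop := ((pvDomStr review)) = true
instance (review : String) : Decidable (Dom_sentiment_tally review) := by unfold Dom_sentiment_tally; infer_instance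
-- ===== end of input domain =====

-- B replaces A's per-word if/elif membership scan with a frequency table built once,
-- then sums the counts of the fixed sentiment word lists (idiomatic index-first style).

-- ===== PORT A =====
def sentiment_tally (review : String) : Int × Int :=
  let positive_words : List String := ["good", "excellent", "great", "awesome", "fantastic", "superb", "amazing"]
  let negative_words : List String := ["bad", "poor", "terrible", "horrible", "awful", "disappointing", "subpar"]
  let words := PySem.Str.split₀ (PySem.Str.lower review)
  words.foldl (fun (acc : Int × Int) word =>
      if word ∈ positive_words then (acc.1 + 1, acc.2)
      else if word ∈ negative_words then (acc.1, acc.2 + 1)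
      else acc)
    (0, 0)

-- ===== PORT B =====
def sentiment_tally_alt (review : String) : Int × Int :=
  let positive_words : List String := ["good", "excellent", "great", "awesome", "fantastic", "superb", "amazing"]
  let negative_words : List String := ["bad", "poor", "terrible", "horrible", "awful", "disappointing", "subpar"]
  let counts : PySem.Dict String Int :=
    (PySem.Str.split₀ (PySem.Str.lower review)).foldl
      (fun d w => d.insert w (d.getD w 0 + 1)) PySem.Dict.empty
  let num_positive_words := (positive_words.map (fun w => counts.getD w 0)).sum
  let num_negative_words := (negative_words.map (fun w => counts.getD w 0)).sum
  (num_positive_words, num_negative_words)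

-- ===== PRECONDITION & SPEC =====
def Spec_sentiment_tally (review : String) (out : Int × Int) : Prop := out = sentiment_tally_alt review
instance (review : String) (out : Int × Int) : Decidable (Spec_sentiment_tally review out) := by unfold Spec_sentiment_tally; infer_instance

-- ===== CLAIM (what is proved, stated in full; the proofs are below) =====
def Claim_equal_sentiment_tally : Prop := ∀ (review : String), Dom_sentiment_tally review → Spec_sentiment_tally review (sentiment_tally review)

-- ===== LEMMAS AND PROOFS =====

-- A's elif loop, characterised: a pair of countP's over the review words.
theorem foldA_eq (P N : List String) (ws : List String) (p q : Int) :
    ws.foldl (fun (acc : Int × Int) w =>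
        if w ∈ P then (acc.1 + 1, acc.2)
        else if w ∈ N then (acc.1, acc.2 + 1)
        else acc) (p, q)
      = (p + (ws.countP (fun w => decide (w ∈ P)) : Int),
         q + (ws.countP (fun w => decide (w ∉ P ∧ w ∈ N)) : Int)) := by
  induction ws generalizing p q with
  | nil => simp
  | cons w ws ih =>
      simp only [List.foldl_cons, List.countP_cons]
      by_cases hP : w ∈ P
      · simp [hP, ih]; ring_nf
      · by_cases hN : w ∈ N
        · simp [hP, hN, ih]; ring_nf
        · simp [hP, hN, ih]

theorem sum_map_add_str (l : List String) (f g : String → Int) :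
    (l.map (fun x => f x + g x)).sum = (l.map f).sum + (l.map g).sum := by
  induction l with
  | nil => simp
  | cons a l ih => simp [ih]; ring

-- sum of 0/1 indicators over a list = its count, as Int
theorem sum_ite_eq_count (P : List String) (w : String) :
    ((P.map (fun p => if p = w then (1 : Int) else 0)).sum) = (P.count w : Int) := by
  induction P with
  | nil => simp
  | cons a P ih =>
      by_cases h : a = w
      · subst h; simp [ih]; omega
      · simp [h, ih]

-- B's sum over a duplicate-free sentiment list = countP of membership over the review words
theorem sum_counts_eq_countP (P : List String) (hP : P.Nodup) (ws : List String) :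
    ((P.map (fun w => (ws.count w : Int))).sum) = (ws.countP (fun w => decide (w ∈ P)) : Int) := by
  induction ws with
  | nil => simp
  | cons w ws ih =>
      have hsplit : ∀ p : String, (List.count p (w :: ws) : Int)
          = (ws.count p : Int) + (if p = w then 1 else 0) := by
        intro p
        by_cases h : p = w
        · simp [h]
        · have h' : ¬ w = p := fun he => h he.symm
          simp [List.count_cons, h, h']
      simp only [hsplit]
      rw [sum_map_add_str, ih, sum_ite_eq_count, List.countP_cons]
      have hcnt : (P.count w : Int) = if w ∈ P then 1 else 0 := by
        by_cases h : w ∈ P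
        · simp [h, List.count_eq_one_of_mem hP h]
        · simp [h, List.count_eq_zero_of_not_mem h]
      rw [hcnt]
      push_cast
      split_ifs <;> simp_all

-- the two sentiment lists are disjoint, so A's elif predicate is plain membership in N
theorem countP_elim_notP (P N ws : List String) (hd : ∀ w, w ∈ N → w ∉ P) :
    ws.countP (fun w => decide (w ∉ P ∧ w ∈ N)) = ws.countP (fun w => decide (w ∈ N)) := by
  refine List.countP_congr ?_
  intro a _
  by_cases h : a ∈ N
  · simp [h, hd a h]
  · simp [h]

-- ===== VERDICT (by name: the statement is the Claim_ definition above) =====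
theorem sentiment_tally_spec : Claim_equal_sentiment_tally := by
  intro review _
  unfold Spec_sentiment_tally sentiment_tally sentiment_tally_alt
  simp only []
  set P : List String := ["good", "excellent", "great", "awesome", "fantastic", "superb", "amazing"] with hPdef
  set N : List String := ["bad", "poor", "terrible", "horrible", "awful", "disappointing", "subpar"] with hNdef
  set ws := PySem.Str.split₀ (PySem.Str.lower review) with hws
  rw [foldA_eq]
  have hget : ∀ v : String,
      ((ws.foldl (fun d w => d.insert w (d.getD w 0 + 1)) (PySem.Dict.empty : PySem.Dict String Int)).getD v 0)
        = (ws.count v : Int) := by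
    intro v; simp [PySem.Dict.getD_foldl_insert_add_one]
  simp only [hget]
  rw [sum_counts_eq_countP P (by rw [hPdef]; decide) ws,
      sum_counts_eq_countP N (by rw [hNdef]; decide) ws,
      countP_elim_notP P N ws (by intro w hw; rw [hNdef] at hw; fin_cases hw <;> (rw [hPdef]; decide))]
  simp
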